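-- pv_equiv track=rewrite | github.com/ASSERT-KTH/DepPrune | utils.py | transform_array_with_string
-- ===== SOURCE A (Python) =====
-- def transform_array_with_string(input_array, join_string):
--     output_array = []
--     current_path = ""
--
--     for item in input_array:
--         if current_path:
--             current_path += "/"
--         current_path += item
--         output_array.append(current_path + "/" + join_string)
--
--     return output_array
-- ===== SOURCE B (Python) =====
-- def transform_array_with_string(input_array, join_string):
--     # Each output element is rebuilt independently from a prefix slice:
--     # output[i] = '/'.join(input_array[:i+1]) + '/' + join_string.
--     return ["/".join(input_array[:i + 1]) + "/" + join_string
--             for i in range(len(input_array))]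
-- ===== Notes on version B (the rewrite author's own statement) =====
-- stated objective: simpler
-- what changed: Replaces A's running current_path accumulator loop with a comprehension that rebuilds each output element independently as '/'.join(input_array[:i+1]) + '/' + join_string from a prefix slice.
-- intended difference: On arrays of length >= 2 whose first element is the empty string, A's `if current_path` truthiness guard skips separators while the accumulated path is still empty and silently collapses leading empty segments (A returns ['/x','a/x'] on (['','a'],'x')); B returns the uniform '/'.join of each prefix (['/x','/a/x']), preserving empty segments exactly like Python's '/'.join — the intended mapping output[i] = '/'.join(input_array[:i+1]) + '/' + join_string. — e.g. on transform_array_with_string(["", "a"], "x"): A returns ["/x", "a/x"], B returns ["/x", "/a/x"]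
import Mathlib
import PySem

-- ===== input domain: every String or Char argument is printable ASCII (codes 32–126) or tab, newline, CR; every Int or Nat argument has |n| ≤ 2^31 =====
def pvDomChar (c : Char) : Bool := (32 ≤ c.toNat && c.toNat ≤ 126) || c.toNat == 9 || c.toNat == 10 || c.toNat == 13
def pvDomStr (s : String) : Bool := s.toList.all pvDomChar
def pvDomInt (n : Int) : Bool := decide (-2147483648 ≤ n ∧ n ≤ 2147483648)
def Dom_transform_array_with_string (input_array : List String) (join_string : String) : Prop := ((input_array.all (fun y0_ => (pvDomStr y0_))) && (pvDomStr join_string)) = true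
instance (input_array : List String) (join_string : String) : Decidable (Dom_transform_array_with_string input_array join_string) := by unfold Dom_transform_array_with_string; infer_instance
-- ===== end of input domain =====

-- B rebuilds each output element independently as '/'.join of a prefix slice plus the suffix,
-- instead of A's running current_path accumulator (objective: simpler decomposition).

-- ===== PORT A =====
-- literal transliteration of A: a fold over the items carrying (output_array, current_path)
def transform_array_with_string (input_array : List String) (join_string : String) : List String :=
  (input_array.foldl
    (fun (st : List String × String) item =>
      let cp := if st.2 ≠ "" then st.2 ++ "/" else st.2   -- if current_path: current_path += "/"
      let cp := cp ++ item                                 -- current_path += item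
      (st.1 ++ [cp ++ "/" ++ join_string], cp))            -- output_array.append(current_path + "/" + join_string)
    ([], "")).1

-- ===== PORT B =====
-- literal transliteration of Source B: for i in range(len(input_array)),
-- '/'.join(input_array[:i+1]) + '/' + join_string
def transform_array_with_string_alt (input_array : List String) (join_string : String) : List String :=
  (PySem.List.pyRange 0 (input_array.length : Int) 1).map
    (fun i => PySem.Str.join "/" (PySem.List.slice input_array none (some (i + 1))) ++ "/" ++ join_string)

-- ===== PRECONDITION & SPEC =====
-- On arrays of length ≥ 2 whose first element is the empty string, A's `if current_path` guard
-- skips the separator while the accumulated path is still empty, silently collapsing leading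
-- empty segments (A returns ['/x','a/x'] on (['','a'],'x')); B returns the uniform '/'.join of
-- each prefix (['/x','/a/x']), which preserves empty segments exactly like Python's '/'.join —
-- the intended mapping output[i] = '/'.join(input_array[:i+1]) + '/' + join_string.
def D_transform_array_with_string (input_array : List String) (join_string : String) : Prop :=
  2 ≤ input_array.length ∧ input_array.head? = some ""
instance (input_array : List String) (join_string : String) : Decidable (D_transform_array_with_string input_array join_string) := by unfold D_transform_array_with_string; infer_instance

def Spec_transform_array_with_string (input_array : List String) (join_string : String) (out : List String) : Prop := ¬ D_transform_array_with_string input_array join_string → out = transform_array_with_string_alt input_array join_string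
instance (input_array : List String) (join_string : String) (out : List String) : Decidable (Spec_transform_array_with_string input_array join_string out) := by unfold Spec_transform_array_with_string; infer_instance

def pvDiffWitness_transform_array_with_string : List String × String := (["", "a"], "x")
def pvDiffWitnessOut_transform_array_with_string : (List String) × (List String) :=
  (["/x", "a/x"], ["/x", "/a/x"])

-- ===== CLAIM (what is proved, stated in full; the proofs are below) =====
def Claim_unchanged_transform_array_with_string : Prop := ∀ (input_array : List String) (join_string : String), Dom_transform_array_with_string input_array join_string → Spec_transform_array_with_string input_array join_string (transform_array_with_string input_array join_string)
def Claim_changed_transform_array_with_string : Prop := Dom_transform_array_with_string (pvDiffWitness_transform_array_with_string.1) (pvDiffWitness_transform_array_with_string.2) ∧ D_transform_array_with_string (pvDiffWitness_transform_array_with_string.1) (pvDiffWitness_transform_array_with_string.2) ∧ transform_array_with_string (pvDiffWitness_transform_array_with_string.1) (pvDiffWitness_transform_array_with_string.2) = pvDiffWitnessOut_transform_array_with_string.1 ∧ transform_array_with_string_alt (pvDiffWitness_transform_array_with_string.1) (pvDiffWitness_transform_array_with_string.2) = pvDiffWitnessOut_transform_array_with_string.2 ∧ pvDiffWitnessOut_transform_array_with_string.1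 ≠ pvDiffWitnessOut_transform_array_with_string.2
def Claim_exact_transform_array_with_string : Prop := ∀ (input_array : List String) (join_string : String), Dom_transform_array_with_string input_array join_string → D_transform_array_with_string input_array join_string → transform_array_with_string input_array join_string ≠ transform_array_with_string_alt input_array join_string

-- ===== LEMMAS AND PROOFS =====

theorem charsJoin_append_singleton (sep : List Char) (p : List (List Char)) (x : List Char) (hp : p ≠ []) :
    PySem.Chars.join sep (p ++ [x]) = PySem.Chars.join sep p ++ sep ++ x := by
  induction p with
  | nil => simp at hp
  | cons a t ih =>
    cases t with
    | nil => simp [PySem.Chars.join_cons_cons, PySem.Chars.join_singleton]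
    | cons b u =>
      rw [List.cons_append, List.cons_append, PySem.Chars.join_cons_cons,
        PySem.Chars.join_cons_cons sep a b u]
      have := ih (by simp)
      rw [List.cons_append] at this
      rw [this]
      simp

theorem strJoin_append_singleton (p : List String) (x : String) (hp : p ≠ []) :
    PySem.Str.join "/" (p ++ [x]) = PySem.Str.join "/" p ++ "/" ++ x := by
  rw [← String.toList_inj]
  have h2 : List.map String.toList p ≠ [] := by simpa using hp
  simp [PySem.Str.toList_join, charsJoin_append_singleton _ _ _ h2]

theorem strJoin_singleton (x : String) : PySem.Str.join "/" [x] = x := by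
  rw [← String.toList_inj]; simp [PySem.Str.toList_join, PySem.Chars.join_singleton]

theorem append_slash_ne (s x : String) : s ++ "/" ++ x ≠ "" := by
  intro h
  rw [← String.toList_inj] at h
  simp at h

-- invariant of A's loop: starting from current_path = '/'.join p (nonempty), the outputs
-- appended are the joins of the successively extended prefixes
theorem tas_fold (j : String) (l p acc : List String) (hp : p ≠ [])
    (hc : PySem.Str.join "/" p ≠ "") :
    (l.foldl
      (fun (st : List String × String) item =>
        let cp := if st.2 ≠ "" then st.2 ++ "/" else st.2
        let cp := cp ++ item
        (st.1 ++ [cp ++ "/" ++ j], cp))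
      (acc, PySem.Str.join "/" p)).1
    = acc ++ (List.range l.length).map
        (fun i => PySem.Str.join "/" (p ++ l.take (i + 1)) ++ "/" ++ j) := by
  induction l generalizing p acc with
  | nil => simp
  | cons x xs ih =>
    have hstep : PySem.Str.join "/" p ++ "/" ++ x = PySem.Str.join "/" (p ++ [x]) :=
      (strJoin_append_singleton p x hp).symm
    simp only [List.foldl_cons, if_pos hc, hstep]
    rw [ih (p ++ [x]) _ (by simp) (hstep ▸ append_slash_ne _ _)]
    rw [List.length_cons, List.range_succ_eq_map]
    simp [List.map_map, Function.comp_def, List.append_assoc]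

-- B's port, rewritten over List.range / List.take
theorem alt_eq_map_range (arr : List String) (j : String) :
    transform_array_with_string_alt arr j
      = (List.range arr.length).map
          (fun i => PySem.Str.join "/" (arr.take (i + 1)) ++ "/" ++ j) := by
  unfold transform_array_with_string_alt
  rw [PySem.List.pyRange_zero_natCast]
  rw [List.map_map]
  apply List.map_congr_left
  intro k _
  have h1 : ((k : Int) + 1) = ((k + 1 : Nat) : Int) := by push_cast; ring
  rw [Function.comp_apply, h1, PySem.List.slice_to_natCast]

theorem tas_foldl_prefix (j : String) (l : List String) (acc : List String) (c : String) :
    ∃ t, (l.foldl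
      (fun (st : List String × String) item =>
        let cp := if st.2 ≠ "" then st.2 ++ "/" else st.2
        let cp := cp ++ item
        (st.1 ++ [cp ++ "/" ++ j], cp))
      (acc, c)).1 = acc ++ t := by
  induction l generalizing acc c with
  | nil => exact ⟨[], by simp⟩
  | cons x xs ih =>
    obtain ⟨t, ht⟩ := ih (acc ++ [((if c ≠ "" then c ++ "/" else c) ++ x) ++ "/" ++ j])
      ((if c ≠ "" then c ++ "/" else c) ++ x)
    exact ⟨[(if c ≠ "" then c ++ "/" else c) ++ x ++ "/" ++ j] ++ t,
      by rw [List.foldl_cons, ht, List.append_assoc]⟩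

-- ===== VERDICT (by name: the statement is the Claim_ definition above) =====
theorem transform_array_with_string_spec : Claim_unchanged_transform_array_with_string := by
  intro arr j _ hnd
  show transform_array_with_string arr j = transform_array_with_string_alt arr j
  rw [alt_eq_map_range]
  match arr with
  | [] => simp [transform_array_with_string]
  | [x] =>
    simp only [transform_array_with_string, List.foldl_cons, List.foldl_nil, List.length_cons,
      List.length_nil, List.range_succ, List.range_zero]
    simp [strJoin_singleton]
  | x :: y :: rest =>
    have hx : x ≠ "" := fun h => hnd ⟨by simp, by simp [h]⟩
    have hne : PySem.Str.join "/" [x] ≠ "" := by rwa [strJoin_singleton]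
    have e1 : transform_array_with_string (x :: y :: rest) j
        = ((y :: rest).foldl
            (fun (st : List String × String) item =>
              let cp := if st.2 ≠ "" then st.2 ++ "/" else st.2
              let cp := cp ++ item
              (st.1 ++ [cp ++ "/" ++ j], cp))
            ([x ++ "/" ++ j], PySem.Str.join "/" [x])).1 := by
      rw [strJoin_singleton]
      simp [transform_array_with_string]
    rw [e1, tas_fold j (y :: rest) [x] _ (by simp) hne]
    rw [show (x :: y :: rest).length = (y :: rest).length + 1 from rfl, List.range_succ_eq_map]
    simp [List.map_map, Function.comp_def, strJoin_singleton]

theorem transform_array_with_string_changed : Claim_changed_transform_array_with_string := by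
  unfold Claim_changed_transform_array_with_string; decide

theorem transform_array_with_string_tight : Claim_exact_transform_array_with_string := by
  intro arr j _ hd heq
  obtain ⟨hlen, hhead⟩ := hd
  match arr, hlen, hhead with
  | a :: x :: rest, _, hhead =>
    have ha : a = "" := by simpa using hhead
    subst ha
    obtain ⟨t, ht⟩ := tas_foldl_prefix j rest
      ["" ++ "" ++ "/" ++ j, "" ++ x ++ "/" ++ j] ("" ++ x)
    have h1 : transform_array_with_string ("" :: x :: rest) j
        = ["" ++ "" ++ "/" ++ j, "" ++ x ++ "/" ++ j] ++ t := by
      simpa [transform_array_with_string] using ht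
    have h2 : (transform_array_with_string_alt ("" :: x :: rest) j)[1]?
        = some (PySem.Str.join "/" ["", x] ++ "/" ++ j) := by
      rw [alt_eq_map_range]
      rw [List.getElem?_map]
      simp [List.take]
    rw [heq] at h1
    have h3 := congrArg (fun l => l[1]?) h1
    simp only [] at h3
    rw [h2] at h3
    simp only [List.cons_append, List.nil_append, List.getElem?_cons_succ,
      List.getElem?_cons_zero] at h3
    have h4 := congrArg (fun s => s.toList.length) (Option.some.inj h3)
    simp [PySem.Str.toList_join, PySem.Chars.join_cons_cons, PySem.Chars.join_singleton] at h4
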